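-- pv_equiv track=rewrite | github.com/mohammadfaiizan/ProjectI | DSA/Theory/String/007_string_two_pointers.py | longest_mountain_string
-- ===== SOURCE A (Python) =====
-- def longest_mountain_string(s: str) -> int:
--     """Find longest mountain subsequence in string"""
--     n = len(s)
--     if n < 3:
--         return 0
--
--     max_length = 0
--
--     for i in range(1, n - 1):
--         # Check if current position can be peak
--         if s[i-1] < s[i] > s[i+1]:
--             # Expand left
--             left = i - 1
--             while left > 0 and s[left-1] < s[left]:
--                 left -= 1
--
--             # Expand right
--             right = i + 1
--             while right < n - 1 and s[right] > s[right+1]: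
--                 right += 1
--
--             max_length = max(max_length, right - left + 1)
--
--     return max_length
-- ===== SOURCE B (Python) =====
-- def longest_mountain_string(s: str) -> int:
--     n = len(s)
--     up = [0]
--     for i in range(1, n):
--         up.append(up[-1] + 1 if s[i-1] < s[i] else 0)
--     down = [0]
--     for i in range(n - 2, -1, -1):
--         down.append(down[-1] + 1 if s[i] > s[i+1] else 0)
--     down.reverse()
--     best = 0
--     for u, d in zip(up, down):
--         if u and d:
--             best = max(best, u + d + 1)
--     return best
-- ===== Notes on version B (the rewrite author's own statement) =====
-- stated objective: alternative
-- what changed: Replaced per-peak bidirectional while-loop expansion with two precomputed rise/fall run-length arrays (one forward pass, one backward pass) combined in a single zip scan.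
import Mathlib
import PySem

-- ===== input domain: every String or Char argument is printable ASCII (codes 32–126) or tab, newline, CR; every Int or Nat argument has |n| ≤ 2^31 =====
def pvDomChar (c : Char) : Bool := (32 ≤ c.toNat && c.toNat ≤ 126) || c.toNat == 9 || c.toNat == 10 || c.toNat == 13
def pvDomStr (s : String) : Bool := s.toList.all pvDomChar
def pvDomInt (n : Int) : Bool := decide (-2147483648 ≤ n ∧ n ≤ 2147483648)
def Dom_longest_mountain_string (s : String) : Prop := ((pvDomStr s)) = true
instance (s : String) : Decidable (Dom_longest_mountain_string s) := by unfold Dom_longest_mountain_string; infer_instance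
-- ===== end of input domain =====

-- B replaces A's per-peak bidirectional while-loop expansion by two precomputed
-- rise/fall run-length lists combined in one zip scan (alternative decomposition, same cost).

-- ===== PORT A =====
-- s[i] for an index known to be in range (every access in both programs is guarded)
def chAt (l : List Char) (i : Nat) : Char := l.getD i ' '

-- 'while left > 0 and s[left-1] < s[left]: left -= 1', started at p, returning the final left
def expandLeft (l : List Char) : Nat → Nat
  | 0 => 0
  | p+1 => if chAt l p < chAt l (p+1) then expandLeft l p else p+1

-- 'while right < n-1 and s[right] > s[right+1]: right += 1', started at p, returning the final right
def expandRight (l : List Char) (n : Nat) (p : Nat) : Nat :=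
  if h : p + 1 < n ∧ chAt l (p+1) < chAt l p then expandRight l n (p+1) else p
termination_by n - p
decreasing_by omega

def longest_mountain_string (s : String) : Int :=
  let l := s.toList
  let n := l.length
  if n < 3 then 0 else
    Int.ofNat ((List.range (n-2)).foldl
      (fun m j =>
        let i := j + 1
        if chAt l (i-1) < chAt l i ∧ chAt l (i+1) < chAt l i then
          let left := expandLeft l (i-1)
          let right := expandRight l n (i+1)
          max m (right - left + 1)
        else m) 0)

-- ===== PORT B =====
def longest_mountain_string_alt (s : String) : Int :=
  let l := s.toList
  let n := l.length
  let up := (List.range' 1 (n-1)).foldl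
      (fun acc i => acc ++ [if chAt l (i-1) < chAt l i then acc.getLastD 0 + 1 else 0]) [0]
  let down := (((List.range (n-1)).reverse).foldl
      (fun acc i => acc ++ [if chAt l (i+1) < chAt l i then acc.getLastD 0 + 1 else 0]) [0]).reverse
  Int.ofNat ((up.zip down).foldl
      (fun best p => if p.1 ≠ 0 ∧ p.2 ≠ 0 then max best (p.1 + p.2 + 1) else best) 0)

-- ===== PRECONDITION & SPEC =====
def Spec_longest_mountain_string (s : String) (out : Int) : Prop := out = longest_mountain_string_alt s
instance (s : String) (out : Int) : Decidable (Spec_longest_mountain_string s out) := by unfold Spec_longest_mountain_string; infer_instance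

-- ===== CLAIM (what is proved, stated in full; the proofs are below) =====
def Claim_equal_longest_mountain_string : Prop := ∀ (s : String), Dom_longest_mountain_string s → Spec_longest_mountain_string s (longest_mountain_string s)

-- ===== LEMMAS AND PROOFS =====

-- the two ports as functions of the character list
def aBody (l : List Char) : Int :=
  let n := l.length
  if n < 3 then 0 else
    Int.ofNat ((List.range (n-2)).foldl
      (fun m j =>
        let i := j + 1
        if chAt l (i-1) < chAt l i ∧ chAt l (i+1) < chAt l i then
          let left := expandLeft l (i-1)
          let right := expandRight l n (i+1)
          max m (right - left + 1)
        else m) 0)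

def bBody (l : List Char) : Int :=
  let n := l.length
  let up := (List.range' 1 (n-1)).foldl
      (fun acc i => acc ++ [if chAt l (i-1) < chAt l i then acc.getLastD 0 + 1 else 0]) [0]
  let down := (((List.range (n-1)).reverse).foldl
      (fun acc i => acc ++ [if chAt l (i+1) < chAt l i then acc.getLastD 0 + 1 else 0]) [0]).reverse
  Int.ofNat ((up.zip down).foldl
      (fun best p => if p.1 ≠ 0 ∧ p.2 ≠ 0 then max best (p.1 + p.2 + 1) else best) 0)

lemma a_eq (s : String) : longest_mountain_string s = aBody s.toList := rfl
lemma b_eq (s : String) : longest_mountain_string_alt s = bBody s.toList := rfl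

-- length of the strictly increasing run ending at index p
def upRun (l : List Char) : Nat → Nat
  | 0 => 0
  | p+1 => if chAt l p < chAt l (p+1) then upRun l p + 1 else 0

-- length of the strictly decreasing run starting at index p (within length n)
def downRun (l : List Char) (n : Nat) (p : Nat) : Nat :=
  if h : p + 1 < n ∧ chAt l (p+1) < chAt l p then downRun l n (p+1) + 1 else 0
termination_by n - p
decreasing_by omega

lemma upRun_le (l : List Char) (p : Nat) : upRun l p ≤ p := by
  induction p with
  | zero => simp [upRun]
  | succ p ih => simp only [upRun]; split <;> omega

lemma expandLeft_eq (l : List Char) (p : Nat) : expandLeft l p = p - upRun l p := by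
  induction p with
  | zero => simp [expandLeft, upRun]
  | succ p ih =>
    have := upRun_le l p
    simp only [expandLeft, upRun]; split <;> omega

lemma expandRight_eq (l : List Char) (n p : Nat) : expandRight l n p = p + downRun l n p := by
  fun_induction expandRight l n p with
  | case1 p h ih => rw [downRun]; simp [h]; omega
  | case2 p h => rw [downRun]; simp [h]

lemma getLastD_map_range (f : Nat → Nat) (k : Nat) :
    ((List.range (k+1)).map f).getLastD 0 = f k := by
  simp [List.range_succ]

lemma upFold_eq (l : List Char) (m : Nat) :
    (List.range' 1 m).foldl
      (fun acc i => acc ++ [if chAt l (i-1) < chAt l i then acc.getLastD 0 + 1 else 0]) [0]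
    = (List.range (m+1)).map (upRun l) := by
  induction m with
  | zero => simp [List.range_one, upRun]
  | succ m ih =>
    rw [List.range'_concat, List.foldl_append, ih]
    have h1 : 1 + 1 * m = m + 1 := by omega
    rw [h1]
    simp only [List.foldl_cons, List.foldl_nil, getLastD_map_range, Nat.add_sub_cancel]
    rw [List.range_succ (n := m+1), List.map_append]
    congr 1

lemma downFoldAux (l : List Char) (n : Nat) : ∀ (k t : Nat), t + k + 1 = n →
    ((List.range' t k).reverse).foldl
      (fun acc i => acc ++ [if chAt l (i+1) < chAt l i then acc.getLastD 0 + 1 else 0]) [0]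
    = ((List.range' t (k+1)).map (downRun l n)).reverse := by
  intro k
  induction k with
  | zero =>
    intro t ht
    have h0 : downRun l n t = 0 := by
      rw [downRun]; split
      · omega
      · rfl
    simp [h0]
  | succ k ih =>
    intro t ht
    rw [List.range'_succ, List.reverse_cons, List.foldl_append, ih (t+1) (by omega)]
    simp only [List.foldl_cons, List.foldl_nil]
    have hlast : (((List.range' (t+1) (k+1)).map (downRun l n)).reverse).getLastD 0
        = downRun l n (t+1) := by
      rw [List.range'_succ, List.map_cons, List.reverse_cons, List.getLastD_concat]
    rw [hlast]
    have hdt : downRun l n t =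
        if chAt l (t+1) < chAt l t then downRun l n (t+1) + 1 else 0 := by
      rw [downRun]
      have hn : t + 1 < n := by omega
      split <;> split <;> simp_all
    rw [List.range'_succ (s := t) (n := k+1), List.map_cons, List.reverse_cons, ← hdt]

lemma downFold_eq (l : List Char) (n : Nat) (hn : 1 ≤ n) :
    (((List.range (n-1)).reverse).foldl
      (fun acc i => acc ++ [if chAt l (i+1) < chAt l i then acc.getLastD 0 + 1 else 0]) [0]).reverse
    = (List.range n).map (downRun l n) := by
  have h0 : (0 : Nat) + (n-1) + 1 = n := by omega
  have h := downFoldAux l n (n-1) 0 h0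
  rw [List.range_eq_range', h, List.reverse_reverse, List.range_eq_range']
  congr 2
  omega

lemma bBody_eq_fold (l : List Char) (h : 1 ≤ l.length) :
    bBody l = Int.ofNat ((List.range l.length).foldl
      (fun b i => if upRun l i ≠ 0 ∧ downRun l l.length i ≠ 0
        then max b (upRun l i + downRun l l.length i + 1) else b) 0) := by
  simp only [bBody]
  rw [upFold_eq l (l.length - 1), Nat.sub_add_cancel h,
    downFold_eq l l.length h, List.zip_map', List.foldl_map]

lemma upRun_pos_iff (l : List Char) (j : Nat) :
    upRun l (j+1) ≠ 0 ↔ chAt l j < chAt l (j+1) := by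
  simp only [upRun]; split <;> simp_all

lemma downRun_pos_iff (l : List Char) (n p : Nat) :
    downRun l n p ≠ 0 ↔ (p + 1 < n ∧ chAt l (p+1) < chAt l p) := by
  rw [downRun]; split <;> simp_all

lemma abody_eq (l : List Char) : aBody l = bBody l := by
  rcases Nat.lt_or_ge l.length 1 with h0 | h1
  · have : l = [] := List.length_eq_zero_iff.mp (by omega)
    subst this; rfl
  · rw [bBody_eq_fold l h1]
    by_cases h3 : l.length < 3
    · unfold aBody
      rw [if_pos h3]
      have e0 : upRun l 0 = 0 := rfl
      have hlen : l.length = 1 ∨ l.length = 2 := by omega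
      rcases hlen with hlen | hlen
      · rw [hlen, List.range_one]
        simp [e0]
      · have e1 : downRun l 2 1 = 0 := by
          rw [downRun]; split
          · omega
          · rfl
        rw [hlen, show List.range 2 = [0, 1] from rfl]
        simp [e0, e1]
    · unfold aBody
      rw [if_neg h3]
      congr 1
      obtain ⟨m, hm⟩ : ∃ m, l.length = m + 2 := ⟨l.length - 2, by omega⟩
      have hrange : List.range l.length = (0 :: (List.range m).map Nat.succ) ++ [m+1] := by
        rw [hm, List.range_succ, List.range_succ_eq_map]
      have hdz : downRun l l.length (m+1) = 0 := by
        rw [downRun]; split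
        · omega
        · rfl
      rw [hrange, List.foldl_append, List.foldl_cons, List.foldl_nil]
      rw [if_neg (fun hcon => hcon.2 hdz)]
      rw [List.foldl_cons]
      rw [if_neg (fun hcon => hcon.1 rfl), List.foldl_map]
      rw [show l.length - 2 = m from by omega]
      apply PySem.List.foldl_congr_mem'
      intro j hj acc
      have hjm : j < m := List.mem_range.mp hj
      simp only [Nat.succ_eq_add_one, Nat.add_sub_cancel]
      have hj2 : j + 1 + 1 < l.length := by omega
      by_cases hc1 : chAt l j < chAt l (j+1)
      · by_cases hc2 : chAt l (j+1+1) < chAt l (j+1)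
        · rw [if_pos ⟨hc1, hc2⟩,
            if_pos ⟨(upRun_pos_iff l j).mpr hc1, (downRun_pos_iff l l.length (j+1)).mpr ⟨hj2, hc2⟩⟩]
          have hu1 : upRun l (j+1) = upRun l j + 1 := by simp [upRun, hc1]
          have hd1 : downRun l l.length (j+1) = downRun l l.length (j+1+1) + 1 := by
            rw [downRun, dif_pos ⟨hj2, hc2⟩]
          rw [expandLeft_eq, expandRight_eq, hu1, hd1]
          have := upRun_le l j
          congr 1
          omega
        · rw [if_neg (by tauto),
            if_neg (by rw [downRun_pos_iff]; tauto)]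
      · rw [if_neg (by tauto),
          if_neg (by rw [upRun_pos_iff]; tauto)]

lemma main_eq (s : String) : longest_mountain_string s = longest_mountain_string_alt s := by
  rw [a_eq, b_eq, abody_eq]

-- ===== VERDICT (by name: the statement is the Claim_ definition above) =====
theorem longest_mountain_string_spec : Claim_equal_longest_mountain_string := by
  intro s _
  unfold Spec_longest_mountain_string
  exact main_eq s
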